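-- pv_equiv track=rewrite | github.com/tim1103/bassoon | services/scheduling_service.py | _count_teacher_conflicts
-- ===== SOURCE A (Python) =====
-- from typing import Dict, List, Any, Tuple
--
-- def _count_teacher_conflicts(schedule: Dict, teachers: List[Dict]) -> int:
--     """统计教师冲突次数"""
--     conflicts = 0
--     teacher_schedule = {}  # {teacher_id: {day: {slot: count}}}
--
--     for class_id, class_schedule in schedule.items():
--         for day, slots in class_schedule.items():
--             for slot, task in slots.items():
--                 teacher_id = task['teacher_id']
--                 if teacher_id not in teacher_schedule:
--                     teacher_schedule[teacher_id] = {}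
--                 if day not in teacher_schedule[teacher_id]:
--                     teacher_schedule[teacher_id][day] = {}
--                 if slot not in teacher_schedule[teacher_id][day]:
--                     teacher_schedule[teacher_id][day][slot] = 0
--                 teacher_schedule[teacher_id][day][slot] += 1
--
--                 if teacher_schedule[teacher_id][day][slot] > 1:
--                     conflicts += 1
--
--     return conflicts
-- ===== SOURCE B (Python) =====
-- def _count_teacher_conflicts(schedule, teachers):
--     """统计教师冲突次数"""
--     keys = [(task['teacher_id'], day, slot)
--             for class_schedule in schedule.values()
--             for day, slots in class_schedule.items()
--             for slot, task in slots.items()]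
--
--     def surplus(ks):
--         # duplicates of the first key, plus (recursively) the surplus of what's left
--         if not ks:
--             return 0
--         rest = [k for k in ks[1:] if k != ks[0]]
--         return (len(ks) - 1 - len(rest)) + surplus(rest)
--
--     return surplus(keys)
-- ===== Notes on version B (the rewrite author's own statement) =====
-- stated objective: alternative
-- what changed: B flattens the schedule to a list of (teacher_id, day, slot) keys and then counts conflicts by recursive distinct-head elimination: it counts and removes every copy of the first key, adds that surplus, and recurses on the remainder -- no dict, set or counter, recursion plus filtering instead of A's single-pass nested-dict counting.
import Mathlib
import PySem

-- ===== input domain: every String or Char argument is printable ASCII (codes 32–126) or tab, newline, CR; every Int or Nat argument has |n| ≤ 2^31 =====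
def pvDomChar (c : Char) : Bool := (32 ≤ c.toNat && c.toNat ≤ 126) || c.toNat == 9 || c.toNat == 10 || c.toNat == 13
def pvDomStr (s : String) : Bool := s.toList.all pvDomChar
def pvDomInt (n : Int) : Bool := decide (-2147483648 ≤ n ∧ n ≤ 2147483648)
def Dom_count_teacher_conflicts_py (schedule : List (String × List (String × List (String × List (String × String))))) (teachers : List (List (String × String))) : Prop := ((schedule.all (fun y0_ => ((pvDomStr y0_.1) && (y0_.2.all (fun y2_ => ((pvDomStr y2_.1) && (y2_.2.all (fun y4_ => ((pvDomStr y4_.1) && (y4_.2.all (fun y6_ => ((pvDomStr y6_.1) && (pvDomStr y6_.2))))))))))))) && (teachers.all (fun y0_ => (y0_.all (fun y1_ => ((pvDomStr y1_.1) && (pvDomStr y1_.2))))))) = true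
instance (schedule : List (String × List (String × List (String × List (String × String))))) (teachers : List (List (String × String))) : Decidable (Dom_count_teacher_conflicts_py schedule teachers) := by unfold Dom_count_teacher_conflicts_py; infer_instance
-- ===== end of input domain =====

-- B flattens the schedule into one list of (teacher_id, day, slot) keys and counts conflicts by
-- recursive distinct-head elimination (count & remove all copies of the first key, recurse) instead
-- of A's nested-dict counting with an in-loop conflict test (objective: alternative).


-- ===== PORT A =====
-- one iteration of A's innermost loop body: the nested-dict bookkeeping plus the in-loop conflict test.
-- task['teacher_id'] would raise KeyError when the key is missing; Pre_ guarantees presence, so the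
-- getD default "" is unreachable inside Pre_.
def ctcA_step (st : Int × PySem.Dict String (PySem.Dict String (PySem.Dict String Int)))
    (day slot : String) (task : List (String × String)) :
    Int × PySem.Dict String (PySem.Dict String (PySem.Dict String Int)) :=
  let tid := (PySem.Dict.mk task).getD "teacher_id" ""
  let ts := st.2
  let ts := if ts.contains tid then ts else ts.insert tid PySem.Dict.empty
  let d1 := ts.getD tid PySem.Dict.empty
  let d1 := if d1.contains day then d1 else d1.insert day PySem.Dict.empty
  let d2 := d1.getD day PySem.Dict.empty
  let d2 := if d2.contains slot then d2 else d2.insert slot 0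
  let c := d2.getD slot 0 + 1
  let d2 := d2.insert slot c
  let d1 := d1.insert day d2
  let ts := ts.insert tid d1
  (st.1 + (if c > 1 then 1 else 0), ts)

def count_teacher_conflicts_py (schedule : List (String × List (String × List (String × List (String × String))))) (teachers : List (List (String × String))) : Int :=
  (schedule.foldl (fun st cls =>
      cls.2.foldl (fun st dayp =>
        dayp.2.foldl (fun st slotp => ctcA_step st dayp.1 slotp.1 slotp.2) st) st)
    (0, PySem.Dict.empty)).1

-- ===== PORT B =====
-- the comprehension building the flat key list
def ctcB_keys (schedule : List (String × List (String × List (String × List (String × String))))) :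
    List (String × String × String) :=
  schedule.flatMap (fun cls =>
    cls.2.flatMap (fun dayp =>
      dayp.2.map (fun slotp => ((PySem.Dict.mk slotp.2).getD "teacher_id" "", dayp.1, slotp.1))))

-- Source B's recursive 'surplus': drop every copy of the first key, add the number dropped, recurse
def ctcSurplus : List (String × String × String) → Int
  | [] => 0
  | k :: t =>
    let rest := t.filter (fun x => x ≠ k)
    ((t.length : Int) - (rest.length : Int)) + ctcSurplus rest
termination_by ks => ks.length
decreasing_by
  simp only [List.length_unattach, List.length_cons]
  exact Nat.lt_succ_of_le (le_trans (List.length_filter_le _ _) (by simp))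

def count_teacher_conflicts_py_alt (schedule : List (String × List (String × List (String × List (String × String))))) (teachers : List (List (String × String))) : Int :=
  ctcSurplus (ctcB_keys schedule)

-- ===== PRECONDITION & SPEC =====
-- Pre_ excludes inputs where some task dict lacks the key 'teacher_id': there A (and B) raise KeyError.
def Pre_count_teacher_conflicts_py (schedule : List (String × List (String × List (String × List (String × String))))) (teachers : List (List (String × String))) : Prop :=
  (schedule.all (fun cls => cls.2.all (fun dayp => dayp.2.all (fun slotp =>
    slotp.2.any (fun kv => kv.1 == "teacher_id"))))) = true
instance (schedule : List (String × List (String × List (String × List (String × String))))) (teachers : List (List (String × String))) : Decidable (Pre_count_teacher_conflicts_py schedule teachers) := by unfold Pre_count_teacher_conflicts_py; infer_instance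

def pvWitness_count_teacher_conflicts_py : (List (String × List (String × List (String × List (String × String))))) × (List (List (String × String))) :=
  ([("c1", [("mon", [("1", [("teacher_id", "t1")]), ("2", [("teacher_id", "t1")])])]),
    ("c2", [("mon", [("1", [("teacher_id", "t1")])])])], [])

def Spec_count_teacher_conflicts_py (schedule : List (String × List (String × List (String × List (String × String))))) (teachers : List (List (String × String))) (out : Int) : Prop := out = count_teacher_conflicts_py_alt schedule teachers
instance (schedule : List (String × List (String × List (String × List (String × String))))) (teachers : List (List (String × String))) (out : Int) : Decidable (Spec_count_teacher_conflicts_py schedule teachers out) := by unfold Spec_count_teacher_conflicts_py; infer_instance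

-- ===== CLAIM (what is proved, stated in full; the proofs are below) =====
def Claim_equal_count_teacher_conflicts_py : Prop := ∀ (schedule : List (String × List (String × List (String × List (String × String))))) (teachers : List (List (String × String))), Dom_count_teacher_conflicts_py schedule teachers → Pre_count_teacher_conflicts_py schedule teachers → Spec_count_teacher_conflicts_py schedule teachers (count_teacher_conflicts_py schedule teachers)

-- ===== LEMMAS AND PROOFS =====

-- the count A's nested dict stores for a key triple
def ctcCnt (ts : PySem.Dict String (PySem.Dict String (PySem.Dict String Int)))
    (e : String × String × String) : Int :=
  ((ts.getD e.1 PySem.Dict.empty).getD e.2.1 PySem.Dict.empty).getD e.2.2 0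

-- the three 'if k not in d: d[k] = …' initialisations and the two updates of A's step, named
def ctcD2 (d2 : PySem.Dict String Int) (s : String) : PySem.Dict String Int :=
  if d2.contains s then d2 else d2.insert s 0

def ctcD2' (d2 : PySem.Dict String Int) (s : String) : PySem.Dict String Int :=
  (ctcD2 d2 s).insert s ((ctcD2 d2 s).getD s 0 + 1)

def ctcD1 (d1 : PySem.Dict String (PySem.Dict String Int)) (day : String) :
    PySem.Dict String (PySem.Dict String Int) :=
  if d1.contains day then d1 else d1.insert day PySem.Dict.empty

def ctcD1' (d1 : PySem.Dict String (PySem.Dict String Int)) (day slot : String) :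
    PySem.Dict String (PySem.Dict String Int) :=
  (ctcD1 d1 day).insert day (ctcD2' ((ctcD1 d1 day).getD day PySem.Dict.empty) slot)

def ctcTs (ts : PySem.Dict String (PySem.Dict String (PySem.Dict String Int))) (t : String) :
    PySem.Dict String (PySem.Dict String (PySem.Dict String Int)) :=
  if ts.contains t then ts else ts.insert t PySem.Dict.empty

-- A's step as a function of the flat key triple
def ctcT (st : Int × PySem.Dict String (PySem.Dict String (PySem.Dict String Int)))
    (e : String × String × String) :
    Int × PySem.Dict String (PySem.Dict String (PySem.Dict String Int)) :=
  (st.1 + (if (ctcD2 ((ctcD1 ((ctcTs st.2 e.1).getD e.1 PySem.Dict.empty) e.2.1).getD e.2.1 PySem.Dict.empty) e.2.2).getD e.2.2 0 + 1 > 1 then 1 else 0),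
   (ctcTs st.2 e.1).insert e.1 (ctcD1' ((ctcTs st.2 e.1).getD e.1 PySem.Dict.empty) e.2.1 e.2.2))

theorem ctcA_step_eq (st : Int × PySem.Dict String (PySem.Dict String (PySem.Dict String Int)))
    (day slot : String) (task : List (String × String)) :
    ctcA_step st day slot task = ctcT st ((PySem.Dict.mk task).getD "teacher_id" "", day, slot) := rfl

-- a conditional 'if k not in d: d[k] = v0' does not change getD-at-default lookups
theorem getD_ite_insert {ν : Type} (d : PySem.Dict String ν) (k k' : String) (v0 : ν) :
    ((if d.contains k then d else d.insert k v0).getD k' v0) = d.getD k' v0 := by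
  by_cases h : d.contains k
  · simp [h]
  · rw [if_neg h, PySem.Dict.getD_insert]
    by_cases hk : k' = k
    · subst hk; rw [PySem.Dict.getD_of_not_contains _ _ (by simpa using h)]; simp
    · simp [hk]

theorem ctcD2'_getD (d2 : PySem.Dict String Int) (s s' : String) :
    (ctcD2' d2 s).getD s' 0 = if s' = s then d2.getD s 0 + 1 else d2.getD s' 0 := by
  rw [ctcD2', PySem.Dict.getD_insert]
  by_cases hs : s' = s
  · simp [hs, ctcD2, getD_ite_insert]
  · simp [hs, ctcD2, getD_ite_insert]

theorem ctcD1'_cnt (d1 : PySem.Dict String (PySem.Dict String Int)) (day slot d' s' : String) :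
    ((ctcD1' d1 day slot).getD d' PySem.Dict.empty).getD s' 0
      = if d' = day ∧ s' = slot then (d1.getD day PySem.Dict.empty).getD slot 0 + 1
        else (d1.getD d' PySem.Dict.empty).getD s' 0 := by
  rw [ctcD1', PySem.Dict.getD_insert]
  by_cases hd : d' = day
  · subst hd
    rw [if_pos rfl, ctcD2'_getD, ctcD1, getD_ite_insert]
    by_cases hs : s' = slot
    · simp [hs]
    · simp [hs]
  · rw [if_neg hd, ctcD1, getD_ite_insert]
    simp [hd]

theorem ctcCnt_ctcT (st : Int × PySem.Dict String (PySem.Dict String (PySem.Dict String Int)))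
    (e e' : String × String × String) :
    ctcCnt (ctcT st e).2 e' = if e' = e then ctcCnt st.2 e + 1 else ctcCnt st.2 e' := by
  obtain ⟨t, d, s⟩ := e
  obtain ⟨t', d', s'⟩ := e'
  simp only [ctcT, ctcCnt]
  rw [PySem.Dict.getD_insert]
  by_cases ht : t' = t
  · subst ht
    rw [if_pos rfl, ctcD1'_cnt, ctcTs, getD_ite_insert]
    by_cases hd : d' = d
    · by_cases hs : s' = s
      · simp [hd, hs]
      · simp [hd, hs]
    · simp [hd, Prod.ext_iff]
  · rw [if_neg ht, ctcTs, getD_ite_insert]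
    simp [Prod.ext_iff, ht]

theorem ctcT_fst (st : Int × PySem.Dict String (PySem.Dict String (PySem.Dict String Int)))
    (e : String × String × String) :
    (ctcT st e).1 = st.1 + (if 0 < ctcCnt st.2 e then 1 else 0) := by
  obtain ⟨t, d, s⟩ := e
  simp only [ctcT, ctcCnt]
  rw [ctcD2, getD_ite_insert, ctcD1, getD_ite_insert, ctcTs, getD_ite_insert]
  congr 1
  split_ifs <;> omega

theorem cnt_empty (e : String × String × String) : ctcCnt PySem.Dict.empty e = 0 := by
  simp [ctcCnt, PySem.Dict.getD_empty]

-- distinct-count after removing one element: discard vs filter, same length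
theorem length_discard_ofList (M : List (String × String × String)) (e : String × String × String) :
    (PySem.Set.discard (PySem.Set.ofList M) e).length
      = (PySem.Set.ofList (M.filter (fun x => x ≠ e))).length := by
  apply List.Perm.length_eq
  rw [List.perm_ext_iff_of_nodup (PySem.Set.nodup_discard _ _ (PySem.Set.nodup_ofList M))
    (PySem.Set.nodup_ofList _)]
  intro x
  simp [PySem.Set.mem_discard, PySem.Set.mem_ofList, List.mem_filter]

-- main invariant for A: the fold counts total entries minus the entries still unseen-and-distinct
theorem ctcT_foldl (L : List (String × String × String)) :
    ∀ (c : Int) (ts : PySem.Dict String (PySem.Dict String (PySem.Dict String Int))),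
    (∀ x, 0 ≤ ctcCnt ts x) →
    (L.foldl ctcT (c, ts)).1
      = c + (L.length : Int)
        - ((PySem.Set.ofList (L.filter (fun e => ctcCnt ts e == 0))).length : Int) := by
  induction L with
  | nil => intro c ts _; simp [PySem.Set.ofList]
  | cons e L ih =>
    intro c ts hnn
    have hcnt : ∀ x, ctcCnt (ctcT (c, ts) e).2 x
        = if x = e then ctcCnt ts e + 1 else ctcCnt ts x := fun x => ctcCnt_ctcT (c, ts) e x
    have hnn' : ∀ x, 0 ≤ ctcCnt (ctcT (c, ts) e).2 x := by
      intro x; rw [hcnt x]; split_ifs with h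
      · have := hnn e; omega
      · exact hnn x
    have heta : L.foldl ctcT (ctcT (c, ts) e)
        = L.foldl ctcT ((ctcT (c, ts) e).1, (ctcT (c, ts) e).2) := rfl
    rw [List.foldl_cons, heta, ih _ _ hnn', ctcT_fst (c, ts) e]
    by_cases he : 0 < ctcCnt ts e
    · -- e was seen before: contributes a conflict; its key is not "new" for either filter
      have hPe : (ctcCnt ts e == 0) = false := by simp; omega
      have hfilter : L.filter (fun x => ctcCnt (ctcT (c, ts) e).2 x == 0)
          = L.filter (fun x => ctcCnt ts x == 0) := by
        apply List.filter_congr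
        intro x _
        rw [hcnt x]
        split_ifs with h
        · subst h
          have h1 : (ctcCnt ts x + 1 == 0) = false := by simp; omega
          have h2 : (ctcCnt ts x == 0) = false := by simp; omega
          rw [h1, h2]
        · rfl
      rw [hfilter]
      simp only [List.filter_cons, hPe, if_pos he, Bool.false_eq_true, if_false,
        List.length_cons]
      push_cast
      omega
    · -- e is new: no conflict; e joins the distinct set
      have he0 : ctcCnt ts e = 0 := by have := hnn e; omega
      have hPe : (ctcCnt ts e == 0) = true := by simp [he0]
      have hfilter : L.filter (fun x => ctcCnt (ctcT (c, ts) e).2 x == 0)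
          = (L.filter (fun x => ctcCnt ts x == 0)).filter (fun x => x ≠ e) := by
        rw [List.filter_filter]
        apply List.filter_congr
        intro x _
        rw [hcnt x]
        split_ifs with h
        · subst h
          have h1 : (ctcCnt ts x + 1 == 0) = false := by rw [he0]; decide
          rw [h1]
          simp
        · simp [h]
      rw [hfilter]
      simp only [List.filter_cons, hPe, if_true, if_neg he, List.length_cons]
      rw [PySem.Set.ofList_cons]
      have hlen := length_discard_ofList (L.filter (fun x => ctcCnt ts x == 0)) e
      simp only [List.length_cons]
      push_cast
      omega

-- A's nested loops are the fold of ctcT over the flattened key list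
theorem ctcA_flatten (schedule : List (String × List (String × List (String × List (String × String)))))
    (st : Int × PySem.Dict String (PySem.Dict String (PySem.Dict String Int))) :
    schedule.foldl (fun st cls =>
        cls.2.foldl (fun st dayp =>
          dayp.2.foldl (fun st slotp => ctcA_step st dayp.1 slotp.1 slotp.2) st) st) st
      = (ctcB_keys schedule).foldl ctcT st := by
  rw [ctcB_keys, List.foldl_flatMap]
  apply PySem.List.foldl_congr_mem
  intro st cls _
  rw [List.foldl_flatMap]
  apply PySem.List.foldl_congr_mem
  intro st dayp _
  rw [List.foldl_map]
  apply PySem.List.foldl_congr_mem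
  intro st slotp _
  exact ctcA_step_eq st dayp.1 slotp.1 slotp.2

-- B's recursion computes total length minus distinct count
theorem ctcSurplus_eq (ks : List (String × String × String)) :
    ctcSurplus ks = (ks.length : Int) - ((PySem.Set.ofList ks).length : Int) := by
  induction ks using ctcSurplus.induct with
  | case1 => simp [ctcSurplus, PySem.Set.ofList]
  | case2 k t rest ih =>
    rw [ctcSurplus]
    have hr : rest = t.filter (fun x => x ≠ k) := by
      simp only [rest]
      rw [List.unattach_filter (g := fun x => decide (x ≠ k)) (hf := fun x h => rfl)]
      simp
    rw [hr] at ih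
    rw [ih, PySem.Set.ofList_cons]
    have hlen := length_discard_ofList t k
    simp only [List.length_cons]
    push_cast
    omega

-- ===== VERDICT (by name: the statement is the Claim_ definition above) =====
theorem count_teacher_conflicts_py_spec : Claim_equal_count_teacher_conflicts_py := by
  intro schedule teachers _ _
  unfold Spec_count_teacher_conflicts_py count_teacher_conflicts_py count_teacher_conflicts_py_alt
  rw [ctcA_flatten, ctcSurplus_eq]
  rw [ctcT_foldl (ctcB_keys schedule) 0 PySem.Dict.empty (fun x => by rw [cnt_empty])]
  have hfilter : (ctcB_keys schedule).filter (fun e => ctcCnt PySem.Dict.empty e == 0)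
      = ctcB_keys schedule := by
    apply List.filter_eq_self.mpr
    intro x _
    simp [cnt_empty]
  rw [hfilter]
  omega
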